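-- pv_equiv track=rewrite | github.com/NicoB-Coding/Graphentheorie-Uebungen | A1/Aufgabe-1.py | find_negative_cycle
-- ===== SOURCE A (Python) =====
-- def find_negative_cycle(next_node, start_node):
--     # Finden eines negativen Zyklus unter Verwendung der Vorgängermatrix
--     cycle = []
--     visited = {node: False for node in next_node}
--     current_node = start_node
--
--     while not visited[current_node]:
--         visited[current_node] = True
--         current_node = next_node[current_node][start_node]
--
--     cycle_start = current_node
--     cycle.append(cycle_start)
--     current_node = next_node[current_node][start_node]
--
--     while current_node != cycle_start:
--         cycle.append(current_node)
--         current_node = next_node[current_node][start_node]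
--
--     cycle.append(cycle_start)
--     return cycle
-- ===== SOURCE B (Python) =====
-- def find_negative_cycle(next_node, start_node):
--     # Single pass: record the walk from start_node in `path` with `pos` giving
--     # each node's index; the first repeated node starts the cycle, which is
--     # returned as a slice of `path`.
--     path = []
--     pos = {}
--     current = start_node
--     while current not in pos:
--         pos[current] = len(path)
--         path.append(current)
--         current = next_node[current][start_node]
--     return path[pos[current]:] + [current]
-- ===== Notes on version B (the rewrite author's own statement) =====
-- stated objective: simpler
-- what changed: A's two while-loops (a visited-flag dict to detect the first repeated node, then a second pointer chase to rebuild the cycle) are replaced by one pass that records the walk in an indexed path list and returns the cycle as the slice of that path from the repeated node's index.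
import Mathlib
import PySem

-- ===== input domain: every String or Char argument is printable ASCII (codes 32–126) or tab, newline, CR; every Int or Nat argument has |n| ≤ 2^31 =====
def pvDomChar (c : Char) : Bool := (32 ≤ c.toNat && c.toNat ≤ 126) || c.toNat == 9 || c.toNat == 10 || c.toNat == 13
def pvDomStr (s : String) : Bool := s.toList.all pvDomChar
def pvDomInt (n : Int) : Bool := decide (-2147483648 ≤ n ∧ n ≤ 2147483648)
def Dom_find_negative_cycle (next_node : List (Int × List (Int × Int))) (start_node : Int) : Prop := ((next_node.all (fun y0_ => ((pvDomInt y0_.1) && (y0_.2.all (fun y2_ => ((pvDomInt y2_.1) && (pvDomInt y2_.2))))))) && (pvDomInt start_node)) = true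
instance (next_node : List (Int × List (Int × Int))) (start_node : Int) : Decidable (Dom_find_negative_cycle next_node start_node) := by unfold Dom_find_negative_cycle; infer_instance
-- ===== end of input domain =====

-- B replaces A's two while-loops (flag-dict detection, then pointer-chasing reconstruction)
-- by ONE pass that records the walk as an indexed path and returns the cycle as a slice (objective: simpler).

-- shared helper: the pointer step next_node[x][start_node], none exactly where Python raises KeyError
def pvStep (next_node : List (Int × List (Int × Int))) (start_node : Int) (x : Int) : Option Int :=
  match PySem.Dict.get? (PySem.Dict.mk next_node) x with
  | none => none
  | some row => PySem.Dict.get? (PySem.Dict.mk row) start_node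

-- ===== PORT A =====
-- first while-loop: walk until a visited node repeats; none = KeyError / fuel out (fuel n+1 is never exhausted: each pass marks a fresh key)
def pvVisitLoop (next_node : List (Int × List (Int × Int))) (start_node : Int) : Nat → PySem.Dict Int Bool → Int → Option Int
  | 0, _, _ => none
  | fuel + 1, visited, cur =>
    match visited.get? cur with
    | none => none
    | some true => some cur
    | some false =>
      match pvStep next_node start_node cur with
      | none => none
      | some nxt => pvVisitLoop next_node start_node fuel (visited.insert cur true) nxt

-- second while-loop: collect the cycle from cycle_start back to itself
def pvCycleLoop (next_node : List (Int × List (Int × Int))) (start_node : Int) (cycle_start : Int) : Nat → Int → List Int → List Int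
  | 0, _, _ => []
  | fuel + 1, cur, cycle =>
    if cur = cycle_start then cycle ++ [cycle_start]
    else
      match pvStep next_node start_node cur with
      | none => []
      | some nxt => pvCycleLoop next_node start_node cycle_start fuel nxt (cycle ++ [cur])

def find_negative_cycle (next_node : List (Int × List (Int × Int))) (start_node : Int) : List Int :=
  let visited : PySem.Dict Int Bool :=
    (next_node.map Prod.fst).foldl (fun d k => d.insert k false) PySem.Dict.empty
  match pvVisitLoop next_node start_node (next_node.length + 1) visited start_node with
  | none => []
  | some cycle_start =>
    match pvStep next_node start_node cycle_start with
    | none => []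
    | some cur => pvCycleLoop next_node start_node cycle_start (next_node.length + 1) cur [cycle_start]

-- ===== PORT B =====
-- the single loop of Source B: path of visited nodes, pos = index of each node in path
def pvWalkLoop (next_node : List (Int × List (Int × Int))) (start_node : Int) : Nat → List Int → PySem.Dict Int Int → Int → List Int
  | 0, _, _, _ => []
  | fuel + 1, path, pos, cur =>
    if pos.contains cur then
      match pos.get? cur with
      | none => []
      | some i => PySem.List.slice path (some i) none ++ [cur]
    else
      match pvStep next_node start_node cur with
      | none => []
      | some nxt => pvWalkLoop next_node start_node fuel (path ++ [cur]) (pos.insert cur (path.length : Int)) nxt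

def find_negative_cycle_alt (next_node : List (Int × List (Int × Int))) (start_node : Int) : List Int :=
  pvWalkLoop next_node start_node (next_node.length + 1) [] PySem.Dict.empty start_node

-- ===== PRECONDITION & SPEC =====
-- Pre_ is EXACT for A's domain: the Python raises KeyError exactly when the pointer walk from
-- start_node escapes the table, i.e. when NO subset of the nodes containing start_node is closed
-- under the successor map row ↦ row[start_node]; inside Pre_ the walk stays in such a subset and must repeat.
def Pre_find_negative_cycle (next_node : List (Int × List (Int × Int))) (start_node : Int) : Prop :=
  ∃ S ∈ (next_node.map Prod.fst).sublists,
    start_node ∈ S ∧ ∀ x ∈ S, ∃ y ∈ S, pvStep next_node start_node x = some y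
instance (next_node : List (Int × List (Int × Int))) (start_node : Int) : Decidable (Pre_find_negative_cycle next_node start_node) := by unfold Pre_find_negative_cycle; infer_instance

def pvWitness_find_negative_cycle : (List (Int × List (Int × Int))) × Int := ([(0, [(0, 1)]), (1, [(0, 0)])], 0)

def Spec_find_negative_cycle (next_node : List (Int × List (Int × Int))) (start_node : Int) (out : List Int) : Prop := out = find_negative_cycle_alt next_node start_node
instance (next_node : List (Int × List (Int × Int))) (start_node : Int) (out : List Int) : Decidable (Spec_find_negative_cycle next_node start_node out) := by unfold Spec_find_negative_cycle; infer_instance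

-- ===== CLAIM (what is proved, stated in full; the proofs are below) =====
def Claim_equal_find_negative_cycle : Prop := ∀ (next_node : List (Int × List (Int × Int))) (start_node : Int), Dom_find_negative_cycle next_node start_node → Pre_find_negative_cycle next_node start_node → Spec_find_negative_cycle next_node start_node (find_negative_cycle next_node start_node)

-- ===== LEMMAS AND PROOFS =====

-- the walk recorded so far: consecutive elements are related by pvStep
def pvChain (next_node : List (Int × List (Int × Int))) (start_node : Int) : List Int → Prop
  | [] => True
  | [_] => True
  | a :: b :: t => pvStep next_node start_node a = some b ∧ pvChain next_node start_node (b :: t)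

theorem pvChain_tail (nn : List (Int × List (Int × Int))) (s x : Int) (xs : List Int)
    (h : pvChain nn s (x :: xs)) : pvChain nn s xs := by
  cases xs with
  | nil => trivial
  | cons b t => exact h.2

theorem pvChain_suffix (nn : List (Int × List (Int × Int))) (s : Int) :
    ∀ (l m : List Int), pvChain nn s (l ++ m) → pvChain nn s m := by
  intro l
  induction l with
  | nil => intro m h; exact h
  | cons x l ih => intro m h; exact ih m (pvChain_tail nn s x (l ++ m) h)

theorem pvChain_cons_append (nn : List (Int × List (Int × Int))) (s a c : Int) (t : List Int)
    (h : pvChain nn s (a :: (t ++ [c]))) :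
    pvStep nn s a = some ((t ++ [c]).headD 0) ∧ pvChain nn s (t ++ [c]) := by
  cases t with
  | nil => exact ⟨h.1, h.2⟩
  | cons y t => exact ⟨h.1, h.2⟩

theorem pvChain_snoc (nn : List (Int × List (Int × Int))) (s a b : Int) :
    ∀ (l : List Int), pvChain nn s (l ++ [a]) → pvStep nn s a = some b →
      pvChain nn s ((l ++ [a]) ++ [b]) := by
  intro l
  induction l with
  | nil => intro _ hs; exact ⟨hs, trivial⟩
  | cons x l ih =>
    intro h hs
    cases l with
    | nil => exact ⟨h.1, hs, trivial⟩
    | cons y l => exact ⟨h.1, ih h.2 hs⟩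

-- A's second loop walks the chain t ++ [c] and appends it to the accumulator
theorem pvCycleLoop_eq (nn : List (Int × List (Int × Int))) (s c : Int) :
    ∀ (t : List Int) (fuel : Nat) (acc : List Int), t.length < fuel → c ∉ t →
      pvChain nn s (t ++ [c]) →
      pvCycleLoop nn s c fuel ((t ++ [c]).headD 0) acc = acc ++ (t ++ [c]) := by
  intro t
  induction t with
  | nil =>
    intro fuel acc hf _ _
    cases fuel with
    | zero => omega
    | succ f => simp [pvCycleLoop]
  | cons h t ih =>
    intro fuel acc hf hc hch
    cases fuel with
    | zero => simp at hf
    | succ f =>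
      have hne : h ≠ c := fun e => hc (e ▸ List.mem_cons_self ..)
      have h2 := pvChain_cons_append nn s h c t hch
      simp only [List.cons_append, List.headD_cons, pvCycleLoop, if_neg hne, h2.1]
      rw [ih f (acc ++ [h]) (by simp at hf ⊢; omega) (fun m => hc (List.mem_cons_of_mem _ m)) h2.2]
      simp

-- initialising the visited dict: every key maps to false
theorem pvVisited_init (ks : List Int) :
    ∀ (d : PySem.Dict Int Bool) (x : Int),
      (ks.foldl (fun d k => d.insert k false) d).get? x
        = if x ∈ ks then some false else d.get? x := by
  induction ks with
  | nil => intro d x; simp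
  | cons k ks ih =>
    intro d x
    rw [List.foldl_cons, ih, PySem.Dict.get?_insert]
    by_cases hx : x ∈ ks
    · simp [hx]
    · by_cases hk : x = k <;> simp [hx, hk]

theorem pvNodup_length_le (l m : List Int) (h : l.Nodup) (hs : ∀ x ∈ l, x ∈ m) : l.length ≤ m.length := by
  calc l.length = l.toFinset.card := (List.toFinset_card_of_nodup h).symm
    _ ≤ m.toFinset.card := Finset.card_le_card (by intro x hx; simp at hx ⊢; exact hs x hx)
    _ ≤ m.length := m.toFinset_card_le

-- the main simulation: A's detect-loop (plus its continuation) against B's single loop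
theorem pvMain (nn : List (Int × List (Int × Int))) (s : Int) :
    ∀ (fuel : Nat) (path : List Int) (visited : PySem.Dict Int Bool) (pos : PySem.Dict Int Int) (cur : Int),
      (∀ x : Int, visited.get? x = if x ∈ nn.map Prod.fst then some (path.contains x) else none) →
      (∀ x : Int, pos.get? x = (PySem.List.index? path x).map (fun n => (n : Int))) →
      path.Nodup → (∀ x ∈ path, x ∈ nn.map Prod.fst) →
      pvChain nn s (path ++ [cur]) →
      (match pvVisitLoop nn s fuel visited cur with
       | none => []
       | some c =>
         match pvStep nn s c with
         | none => []
         | some nx => pvCycleLoop nn s c (nn.length + 1) nx [c])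
      = pvWalkLoop nn s fuel path pos cur := by
  intro fuel
  induction fuel with
  | zero => intro path visited pos cur _ _ _ _ _; simp [pvVisitLoop, pvWalkLoop]
  | succ f ih =>
    intro path visited pos cur hvis hpos hnd hsub hch
    by_cases hk : cur ∈ nn.map Prod.fst
    · by_cases hp : cur ∈ path
      · -- the first repeated node: A reports it, B slices the path at its index
        have hv : visited.get? cur = some true := by rw [hvis]; simp [hk, hp]
        obtain ⟨k, hidx⟩ := Option.isSome_iff_exists.mp
          ((PySem.List.index?_isSome_iff path cur).mpr hp)
        obtain ⟨pre, suf, hpath, hk', hcpre⟩ := (PySem.List.index?_eq_some_iff path cur k).mp hidx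
        have hcont : pos.contains cur = true := by
          rw [PySem.Dict.contains_eq_isSome_get?, hpos, hidx]; rfl
        have hget : pos.get? cur = some ((k : Int)) := by rw [hpos, hidx]; rfl
        have hchain2 : pvChain nn s (cur :: (suf ++ [cur])) := by
          have := pvChain_suffix nn s pre ((cur :: suf) ++ [cur]) (by rw [← List.append_assoc, ← hpath]; exact hch)
          simpa using this
        have h2 := pvChain_cons_append nn s cur cur suf hchain2
        have hcsuf : cur ∉ suf := by
          have := hpath ▸ hnd
          have := (List.Nodup.of_append_right this)
          exact (List.nodup_cons.mp this).1
        have hlen : suf.length < nn.length + 1 := by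
          have h1 : path.length ≤ (nn.map Prod.fst).length := pvNodup_length_le _ _ hnd hsub
          have : suf.length < path.length := by rw [hpath]; simp; omega
          simp at h1; omega
        have hcyc := pvCycleLoop_eq nn s cur suf (nn.length + 1) [cur] hlen hcsuf h2.2
        simp only [pvVisitLoop, hv, pvWalkLoop, hcont, if_true, hget, h2.1, hcyc]
        rw [← hk', hpath, PySem.List.slice_from_natCast, List.drop_left]
        simp
      · -- a fresh node: both sides record it and advance
        have hv : visited.get? cur = some false := by rw [hvis]; simp [hk, hp]
        have hcont : pos.contains cur = false := by
          rw [PySem.Dict.contains_eq_isSome_get?, hpos,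
            (PySem.List.index?_eq_none_iff path cur).mpr hp]; rfl
        cases hstep : pvStep nn s cur with
        | none => simp only [pvVisitLoop, hv, hstep, pvWalkLoop, hcont]; simp
        | some nxt =>
          simp only [pvVisitLoop, hv, hstep, pvWalkLoop, hcont, Bool.false_eq_true, if_false]
          apply ih
          · intro x
            rw [PySem.Dict.get?_insert, hvis]
            by_cases hx : x = cur
            · subst hx; simp [hk, hp]
            · by_cases hxk : x ∈ nn.map Prod.fst <;> simp [hx, hxk]
          · intro x
            rw [PySem.Dict.get?_insert, hpos]
            by_cases hx : x = cur
            · subst hx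
              rw [PySem.List.index?_append_singleton_self path x hp]; simp
            · by_cases hxp : x ∈ path
              · rw [PySem.List.index?_append_of_mem [cur] hxp]; simp [hx]
              · rw [(PySem.List.index?_eq_none_iff path x).mpr hxp,
                  (PySem.List.index?_eq_none_iff (path ++ [cur]) x).mpr (by simp [hxp, hx])]
                simp [hx]
          · simp only [List.nodup_append, List.nodup_singleton]
            exact ⟨hnd, trivial, by simp; exact fun a ha e => hp (e ▸ ha)⟩
          · intro x hx
            rcases List.mem_append.mp hx with h | h
            · exact hsub x h
            · rw [List.mem_singleton.mp h]; exact hk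
          · exact pvChain_snoc nn s cur nxt path hch hstep
    · -- cur is not a node of the table: KeyError on both sides (junk [] in the ports)
      have hv : visited.get? cur = none := by rw [hvis]; simp [hk]
      have hp : cur ∉ path := fun m => hk (hsub cur m)
      have hcont : pos.contains cur = false := by
        rw [PySem.Dict.contains_eq_isSome_get?, hpos,
          (PySem.List.index?_eq_none_iff path cur).mpr hp]; rfl
      have hstep : pvStep nn s cur = none := by
        unfold pvStep
        have hnk : cur ∉ (PySem.Dict.mk nn).keys := by
          intro hmem
          obtain ⟨b, hb⟩ : ∃ b, (cur, b) ∈ nn := by simpa using hmem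
          exact hk (List.mem_map.mpr ⟨(cur, b), hb, rfl⟩)
        rw [(PySem.Dict.get?_eq_none_iff_not_mem_keys (PySem.Dict.mk nn) cur).mpr hnk]
      simp only [pvVisitLoop, hv, pvWalkLoop, hcont, hstep]; simp

-- ===== VERDICT (by name: the statement is the Claim_ definition above) =====
theorem find_negative_cycle_spec : Claim_equal_find_negative_cycle := by
  intro nn s _hdom _hpre
  unfold Spec_find_negative_cycle find_negative_cycle find_negative_cycle_alt
  exact pvMain nn s (nn.length + 1) [] _ PySem.Dict.empty s
    (by intro x; rw [pvVisited_init]; simp)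
    (by intro x; simp [PySem.Dict.get?_empty, PySem.List.index?_eq_idxOf?])
    List.nodup_nil (by simp) trivial
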